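-- pv_equiv track=rewrite | github.com/pon07029/Baekjoon | 1399.py | threeLast
-- ===== SOURCE A (Python) =====
-- dy=[1, 0, -1, 0]
--
-- dx=[0, 1, 0, -1]
--
-- def threeLast(k,arr):
--     na=k%4
--     newarr=[9,9,9,9,9]
--     x,y=0,0
--     for i in range(na):
--         d=i%4
--         x+=dx[d]*newarr[i]
--         y+=dy[d]*newarr[i]
--     if k>=1:
--         y-=8
--     if k>=2:
--         x=x-9+arr[1]
--     return (x,y)
-- ===== SOURCE B (Python) =====
-- def threeLast(k, arr):
--     # closed form: the loop only ever runs k%4 in {0,1,2,3} steps over fixed tables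
--     x, y = [(0, 0), (0, 9), (9, 9), (9, 0)][k % 4]
--     if k >= 1:
--         y -= 8
--     if k >= 2:
--         x = x - 9 + arr[1]
--     return (x, y)
-- ===== Notes on version B (the rewrite author's own statement) =====
-- stated objective: simpler
-- what changed: Replaces the direction-table loop over range(k%4) with a direct 4-entry lookup of the base coordinate by k%4.
import Mathlib
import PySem

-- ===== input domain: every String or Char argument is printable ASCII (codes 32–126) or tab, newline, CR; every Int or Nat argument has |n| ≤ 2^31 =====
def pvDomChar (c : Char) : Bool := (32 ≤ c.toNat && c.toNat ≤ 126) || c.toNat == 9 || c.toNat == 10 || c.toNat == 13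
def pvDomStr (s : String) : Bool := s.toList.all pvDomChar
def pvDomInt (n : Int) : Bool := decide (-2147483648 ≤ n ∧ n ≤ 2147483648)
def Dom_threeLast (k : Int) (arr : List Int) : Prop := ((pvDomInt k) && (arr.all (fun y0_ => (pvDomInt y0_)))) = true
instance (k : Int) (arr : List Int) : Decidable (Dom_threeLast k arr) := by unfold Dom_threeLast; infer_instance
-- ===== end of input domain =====

-- B replaces A's direction-table loop over range(k%4) with a direct 4-entry lookup of the base coordinate (simpler).


-- ===== PORT A =====
def pvDy : List Int := [1, 0, -1, 0]
def pvDx : List Int := [0, 1, 0, -1]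

-- A's 'for i in range(na)' loop over the direction tables, on state (x, y) starting at (0, 0)
def pvLoopA (na : Int) : Int × Int :=
  let newarr : List Int := [9, 9, 9, 9, 9]
  (PySem.List.pyRange 0 na 1).foldl (fun (p : Int × Int) i =>
      let d := PySem.Int.mod i 4
      (p.1 + (PySem.List.pyGet? pvDx d).getD 0 * (PySem.List.pyGet? newarr i).getD 0,
       p.2 + (PySem.List.pyGet? pvDy d).getD 0 * (PySem.List.pyGet? newarr i).getD 0)) (0, 0)

-- na = k % 4; run the loop; then 'if k>=1: y-=8' and 'if k>=2: x=x-9+arr[1]'; return (x, y)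
def threeLast (k : Int) (arr : List Int) : Int × Int :=
  ((if k ≥ 2 then (pvLoopA (PySem.Int.mod k 4)).1 - 9 + (PySem.List.pyGet? arr 1).getD 0
    else (pvLoopA (PySem.Int.mod k 4)).1),
   (if k ≥ 1 then (pvLoopA (PySem.Int.mod k 4)).2 - 8 else (pvLoopA (PySem.Int.mod k 4)).2))

-- ===== PORT B =====
def pvBase : List (Int × Int) := [(0, 0), (0, 9), (9, 9), (9, 0)]

-- B: look the base coordinate up by k % 4, then the same two post-adjustments
def threeLast_alt (k : Int) (arr : List Int) : Int × Int :=
  ((if k ≥ 2 then ((PySem.List.pyGet? pvBase (PySem.Int.mod k 4)).getD (0, 0)).1 - 9 + (PySem.List.pyGet? arr 1).getD 0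
    else ((PySem.List.pyGet? pvBase (PySem.Int.mod k 4)).getD (0, 0)).1),
   (if k ≥ 1 then ((PySem.List.pyGet? pvBase (PySem.Int.mod k 4)).getD (0, 0)).2 - 8
    else ((PySem.List.pyGet? pvBase (PySem.Int.mod k 4)).getD (0, 0)).2))

-- ===== PRECONDITION & SPEC =====
-- Pre_ excludes exactly the inputs where A (and B alike) raise IndexError on arr[1]: k >= 2 with len(arr) < 2.
def Pre_threeLast (k : Int) (arr : List Int) : Prop := k ≥ 2 → 2 ≤ arr.length
instance (k : Int) (arr : List Int) : Decidable (Pre_threeLast k arr) := by unfold Pre_threeLast; infer_instance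
def pvWitness_threeLast : Int × List Int := (3, [4, 5])

def Spec_threeLast (k : Int) (arr : List Int) (out : Int × Int) : Prop := out = threeLast_alt k arr
instance (k : Int) (arr : List Int) (out : Int × Int) : Decidable (Spec_threeLast k arr out) := by unfold Spec_threeLast; infer_instance

-- ===== CLAIM (what is proved, stated in full; the proofs are below) =====
def Claim_equal_threeLast : Prop := ∀ (k : Int) (arr : List Int), Dom_threeLast k arr → Pre_threeLast k arr → Spec_threeLast k arr (threeLast k arr)

-- ===== LEMMAS AND PROOFS =====
theorem pv_mod4_cases (k : Int) :
    PySem.Int.mod k 4 = 0 ∨ PySem.Int.mod k 4 = 1 ∨ PySem.Int.mod k 4 = 2 ∨ PySem.Int.mod k 4 = 3 := by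
  have h1 := PySem.Int.mod_nonneg k (b := 4) (by norm_num)
  have h2 := PySem.Int.mod_lt k (b := 4) (by norm_num)
  omega

-- A's loop computes exactly the table lookup, on every residue of k % 4
theorem pv_loop_eq_base (na : Int) (h : na = 0 ∨ na = 1 ∨ na = 2 ∨ na = 3) :
    pvLoopA na = (PySem.List.pyGet? pvBase na).getD (0, 0) := by
  rcases h with h | h | h | h <;> subst h <;>
  · simp only [pvLoopA, PySem.List.pyRange_one]
    decide

-- ===== VERDICT (by name: the statement is the Claim_ definition above) =====
theorem threeLast_spec : Claim_equal_threeLast := by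
  intro k arr _ _
  unfold Spec_threeLast threeLast threeLast_alt
  rw [pv_loop_eq_base _ (pv_mod4_cases k)]
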